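-- pv_equiv track=rewrite | github.com/lightproud/brain-in-a-vat | projects/wiki/scripts/fetch_portraits.py | find_portrait_image
-- ===== SOURCE A (Python) =====
-- def find_portrait_image(images: list[str], char_name: str) -> str | None:
--     """Find the most likely portrait image from a list of File: titles."""
--     name_lower = char_name.lower().replace("_", " ").replace(":", "")
--     candidates = []
--     for img in images:
--         img_lower = img.lower()
--         # Skip common non-portrait images
--         if any(skip in img_lower for skip in ["icon", "logo", "banner", "map", "ui_"]):
--             continue
--         # Prioritize images with portrait/full/splash/card in name
--         if any(kw in img_lower for kw in ["portrait", "full", "splash", "card_art"]):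
--             candidates.insert(0, img)
--         elif name_lower.split()[0] in img_lower:
--             candidates.append(img)
--     return candidates[0] if candidates else (images[0] if images else None)
-- ===== SOURCE B (Python) =====
-- def find_portrait_image(images: list[str], char_name: str) -> str | None:
--     """Find the most likely portrait image from a list of File: titles."""
--     name_lower = char_name.lower().replace("_", " ").replace(":", "")
--     skips = ("icon", "logo", "banner", "map", "ui_")
--     prios = ("portrait", "full", "splash", "card_art")
--     kept = [(img, low) for img, low in ((img, img.lower()) for img in images)
--             if not any(s in low for s in skips)]
--     prio = [img for img, low in kept if any(k in low for k in prios)]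
--     if prio:
--         return prio[-1]
--     # reached only when no kept image matched a priority keyword,
--     # so no priority re-test is needed here
--     named = [img for img, low in kept if name_lower.split()[0] in low]
--     if named:
--         return named[0]
--     return images[0] if images else None
-- ===== Notes on version B (the rewrite author's own statement) =====
-- stated objective: simpler
-- what changed: Replaces A's single stateful loop that builds a prioritized candidates list with insert(0)/append by three declarative staged comprehensions (lowercase-cached pairs, skip-filter, last priority match, else first name match) with no mutable accumulator; Pre_ excludes only inputs where A raises IndexError (blank keyword-split of char_name reaching the name-match branch).
import Mathlib
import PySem

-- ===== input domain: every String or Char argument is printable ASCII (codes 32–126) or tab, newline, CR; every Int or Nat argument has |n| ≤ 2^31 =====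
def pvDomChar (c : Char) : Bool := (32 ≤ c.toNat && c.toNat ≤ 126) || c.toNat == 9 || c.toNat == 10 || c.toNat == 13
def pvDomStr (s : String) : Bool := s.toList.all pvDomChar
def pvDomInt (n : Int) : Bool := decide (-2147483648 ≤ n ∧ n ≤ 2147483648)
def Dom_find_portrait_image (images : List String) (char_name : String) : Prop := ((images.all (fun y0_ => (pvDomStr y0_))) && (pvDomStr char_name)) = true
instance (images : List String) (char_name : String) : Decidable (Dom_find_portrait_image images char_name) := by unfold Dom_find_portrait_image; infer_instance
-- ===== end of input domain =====

-- B replaces A's single stateful loop (prioritized candidates list built with insert(0)/append)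
-- by three declarative staged filters: skip-filter, last priority match, first name match; objective: simpler.

-- ===== PORT A =====
def pvSkipKws : List String := ["icon", "logo", "banner", "map", "ui_"]
def pvPrioKws : List String := ["portrait", "full", "splash", "card_art"]

-- name_lower.split()[0]: Python raises IndexError when the split is empty; Pre_ excludes
-- exactly those runs, so `.headD ""` here is only evaluated off that raising case inside Pre_.
def pvLoopA (name_lower : String) : List String → List String → List String
  | [], candidates => candidates
  | img :: rest, candidates =>
    let img_lower := PySem.Str.lower img
    if pvSkipKws.any (fun skip => PySem.Str.isIn skip img_lower) then
      pvLoopA name_lower rest candidates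
    else if pvPrioKws.any (fun kw => PySem.Str.isIn kw img_lower) then
      pvLoopA name_lower rest (img :: candidates)   -- candidates.insert(0, img)
    else if PySem.Str.isIn ((PySem.Str.split₀ name_lower).headD "") img_lower then
      pvLoopA name_lower rest (candidates ++ [img])
    else
      pvLoopA name_lower rest candidates

def find_portrait_image (images : List String) (char_name : String) : Option String :=
  let name_lower := PySem.Str.replace (PySem.Str.replace (PySem.Str.lower char_name) "_" " ") ":" ""
  let candidates := pvLoopA name_lower images []
  match candidates with
  | c :: _ => some c
  | [] => match images with
          | i :: _ => some i
          | [] => none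

-- ===== PORT B =====
-- staged comprehensions of Source B: pair each image with its cached lowercase, skip-filter,
-- then last priority match (`prio[-1]` = PySem.List.pyGet? prio (-1)), then first name match
def find_portrait_image_alt (images : List String) (char_name : String) : Option String :=
  let name_lower := PySem.Str.replace (PySem.Str.replace (PySem.Str.lower char_name) "_" " ") ":" ""
  let kept := (images.map (fun img => (img, PySem.Str.lower img))).filter
      (fun p => !(pvSkipKws.any (fun s => PySem.Str.isIn s p.2)))
  let prio := (kept.filter (fun p => pvPrioKws.any (fun k => PySem.Str.isIn k p.2))).map (fun p => p.1)
  if prio ≠ [] then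
    PySem.List.pyGet? prio (-1)
  else
    let named := (kept.filter (fun p =>
        PySem.Str.isIn ((PySem.Str.split₀ name_lower).headD "") p.2)).map (fun p => p.1)
    match named with
    | n :: _ => some n
    | [] => match images with
            | i :: _ => some i
            | [] => none

-- ===== PRECONDITION & SPEC =====
-- Pre_ excludes exactly the inputs where Python A raises IndexError (char_name with no
-- whitespace-separated word, while some image reaches the name-match branch).
def Pre_find_portrait_image (images : List String) (char_name : String) : Prop :=
  PySem.Str.split₀ (PySem.Str.replace (PySem.Str.replace (PySem.Str.lower char_name) "_" " ") ":" "") ≠ []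
  ∨ ∀ img ∈ images,
      (pvSkipKws.any (fun skip => PySem.Str.isIn skip (PySem.Str.lower img))) = true
      ∨ (pvPrioKws.any (fun kw => PySem.Str.isIn kw (PySem.Str.lower img))) = true
instance (images : List String) (char_name : String) : Decidable (Pre_find_portrait_image images char_name) := by unfold Pre_find_portrait_image; infer_instance

def pvWitness_find_portrait_image : List String × String := (["Ann_full.jpg", "ann_pic.png"], "Ann Lee")

def Spec_find_portrait_image (images : List String) (char_name : String) (out : Option String) : Prop := out = find_portrait_image_alt images char_name
instance (images : List String) (char_name : String) (out : Option String) : Decidable (Spec_find_portrait_image images char_name out) := by unfold Spec_find_portrait_image; infer_instance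

-- ===== CLAIM (what is proved, stated in full; the proofs are below) =====
def Claim_equal_find_portrait_image : Prop := ∀ (images : List String) (char_name : String), Dom_find_portrait_image images char_name → Pre_find_portrait_image images char_name → Spec_find_portrait_image images char_name (find_portrait_image images char_name)

-- ===== LEMMAS AND PROOFS =====

def pvIsSkip (img : String) : Bool := pvSkipKws.any (fun skip => PySem.Str.isIn skip (PySem.Str.lower img))
def pvIsPrio (img : String) : Bool := pvPrioKws.any (fun kw => PySem.Str.isIn kw (PySem.Str.lower img))
def pvIsName (nl img : String) : Bool := PySem.Str.isIn ((PySem.Str.split₀ nl).headD "") (PySem.Str.lower img)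

def pvPrios (l : List String) : List String := l.filter (fun img => !pvIsSkip img && pvIsPrio img)
def pvNames (nl : String) (l : List String) : List String := l.filter (fun img => !pvIsSkip img && !pvIsPrio img && pvIsName nl img)

theorem pvLoopA_cons (nl img : String) (rest cands : List String) :
    pvLoopA nl (img :: rest) cands =
      if pvIsSkip img then pvLoopA nl rest cands
      else if pvIsPrio img then pvLoopA nl rest (img :: cands)
      else if pvIsName nl img then pvLoopA nl rest (cands ++ [img])
      else pvLoopA nl rest cands := rfl

theorem pvPrios_cons (img : String) (rest : List String) :
    pvPrios (img :: rest) =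
      (if !pvIsSkip img && pvIsPrio img then [img] else []) ++ pvPrios rest := by
  simp [pvPrios, List.filter_cons]; split_ifs <;> simp

theorem pvNames_cons (nl img : String) (rest : List String) :
    pvNames nl (img :: rest) =
      (if !pvIsSkip img && (!pvIsPrio img && pvIsName nl img) then [img] else []) ++ pvNames nl rest := by
  simp [pvNames, List.filter_cons]; split_ifs <;> simp_all

theorem pvLoopA_eq (nl : String) : ∀ (l cands : List String),
    pvLoopA nl l cands = (pvPrios l).reverse ++ cands ++ pvNames nl l := by
  intro l
  induction l with
  | nil => intro cands; simp [pvLoopA, pvPrios, pvNames]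
  | cons img rest ih =>
    intro cands
    rw [pvLoopA_cons, pvPrios_cons, pvNames_cons]
    by_cases hs : pvIsSkip img <;> by_cases hp : pvIsPrio img <;>
      by_cases hn : pvIsName nl img <;> simp [hs, hp, hn, ih]

-- B's staged pair filters equal the A-side characterizations
theorem pvFilterPairs (q : String × String → Bool) : ∀ (l : List String),
    (((l.map (fun img => (img, PySem.Str.lower img))).filter q).map (fun p => p.1))
      = l.filter (fun img => q (img, PySem.Str.lower img))
  | [] => rfl
  | a :: t => by
    simp only [List.map_cons, List.filter_cons]
    cases h : q (a, PySem.Str.lower a) <;> simp [pvFilterPairs q t]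

theorem pvB_prio_eq (l : List String) :
    (((l.map (fun img => (img, PySem.Str.lower img))).filter
        (fun p => !(pvSkipKws.any (fun s => PySem.Str.isIn s p.2)))).filter
          (fun p => pvPrioKws.any (fun k => PySem.Str.isIn k p.2))).map (fun p => p.1)
      = pvPrios l := by
  rw [List.filter_filter, pvFilterPairs]
  exact List.filter_congr (fun a _ => Bool.and_comm _ _)

theorem pvB_named_eq (nl : String) (l : List String)
    (hP : pvPrios l = []) :
    (((l.map (fun img => (img, PySem.Str.lower img))).filter
        (fun p => !(pvSkipKws.any (fun s => PySem.Str.isIn s p.2)))).filter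
          (fun p => PySem.Str.isIn ((PySem.Str.split₀ nl).headD "") p.2)).map (fun p => p.1)
      = pvNames nl l := by
  rw [List.filter_filter, pvFilterPairs]
  refine List.filter_congr (fun a ha => ?_)
  have hnp := List.filter_eq_nil_iff.mp hP a ha
  show (pvIsName nl a && !pvIsSkip a) = (!pvIsSkip a && !pvIsPrio a && pvIsName nl a)
  revert hnp
  show ¬((!pvIsSkip a && pvIsPrio a) = true) → _
  cases pvIsSkip a <;> cases pvIsPrio a <;> cases pvIsName nl a <;> simp

-- ===== VERDICT (by name: the statement is the Claim_ definition above) =====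
theorem find_portrait_image_spec : Claim_equal_find_portrait_image := by
  intro images char_name _ _
  unfold Spec_find_portrait_image find_portrait_image find_portrait_image_alt
  simp only [pvLoopA_eq]
  rw [pvB_prio_eq]
  by_cases hP : pvPrios images = []
  · rw [if_neg (by simp [hP]), pvB_named_eq _ _ hP]
    simp only [hP, List.reverse_nil, List.nil_append, List.append_nil]
  · rw [if_pos hP, PySem.List.pyGet?_neg_one, ← List.head?_reverse]
    cases hR : (pvPrios images).reverse with
    | nil => exact absurd (by simpa using hR) hP
    | cons p t => simp
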